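-- pv_equiv track=rewrite | github.com/Cracket90/Advent-of-Code | 2024/program_day07.py | do_calculations_concat
-- ===== SOURCE A (Python) =====
-- def do_calculations_concat(operands: list[int]) -> list[int]:
--     if len(operands) == 1:
--         return operands
--     results = []
--     for calculation in do_calculations_concat(operands[1:]):
--         summ = operands[0] + calculation
--         prod = operands[0] * calculation
--         concat = int(str(calculation) + str(operands[0]))
--         results.append(summ)
--         results.append(prod)
--         results.append(concat)
--     return results
-- ===== SOURCE B (Python) =====
-- def do_calculations_concat(operands: list[int]) -> list[int]:
--     if len(operands) == 1:
--         return operands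
--     results = [operands[-1]]
--     for head in reversed(operands[:-1]):
--         results = [value
--                    for calc in results
--                    for value in (head + calc, head * calc, int(str(calc) + str(head)))]
--     return results
-- ===== Notes on version B (the rewrite author's own statement) =====
-- stated objective: alternative
-- what changed: Replaces A's right-recursive descent (one Python call frame per operand) with a single iterative right-to-left loop that rebuilds the result list with a comprehension; same values and order, no recursion.
import Mathlib
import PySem

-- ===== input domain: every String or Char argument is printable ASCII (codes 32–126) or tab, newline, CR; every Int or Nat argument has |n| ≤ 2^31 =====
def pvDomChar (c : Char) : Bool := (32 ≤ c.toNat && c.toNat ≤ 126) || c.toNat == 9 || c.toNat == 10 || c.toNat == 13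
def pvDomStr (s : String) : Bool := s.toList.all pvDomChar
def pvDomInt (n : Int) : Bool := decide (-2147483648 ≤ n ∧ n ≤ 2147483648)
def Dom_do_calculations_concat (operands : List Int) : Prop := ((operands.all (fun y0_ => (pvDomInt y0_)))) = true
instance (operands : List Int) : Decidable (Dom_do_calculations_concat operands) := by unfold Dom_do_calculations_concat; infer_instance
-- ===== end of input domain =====

-- B replaces A's right-recursive descent with one iterative right-to-left loop over the
-- operands that rebuilds the result list with a comprehension (objective: alternative).

-- ===== PORT A =====
-- int(str(calculation) + str(operands[0])); none (Python ValueError, when head < 0) is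
-- mapped to 0 — exactly those inputs are excluded by Pre_ below.
def pyConcatInt (c_ head : Int) : Int :=
  (PySem.Int.ofStr? (PySem.Int.toStr c_ ++ PySem.Int.toStr head)).getD 0

def do_calculations_concat (operands : List Int) : List Int :=
  if operands.length = 1 then operands
  else
    match operands with
    | [] => []   -- Python recurses forever here (RecursionError); excluded by Pre_
    | h :: t =>
      (do_calculations_concat t).foldl
        (fun results calculation =>
          results ++ [h + calculation, h * calculation, pyConcatInt calculation h]) []

-- ===== PORT B =====
def do_calculations_concat_alt (operands : List Int) : List Int :=
  if operands.length = 1 then operands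
  else
    -- results = [operands[-1]]; IndexError on [] mapped to getD 0, excluded by Pre_
    ((PySem.List.slice operands none (some (-1))).reverse).foldl
      (fun results head =>
        results.flatMap (fun c_ =>
          [head + c_, head * c_, pyConcatInt c_ head]))
      [(PySem.List.pyGet? operands (-1)).getD 0]

-- ===== PRECONDITION & SPEC =====
-- Pre_ excludes exactly the inputs on which Python A raises: the empty list
-- (unbounded recursion) and lists with a negative element before the last position
-- (int(str(c_) + str(head)) raises ValueError for a negative head).
def Pre_do_calculations_concat (operands : List Int) : Prop :=
  operands ≠ [] ∧ ∀ x ∈ operands.dropLast, 0 ≤ x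
instance (operands : List Int) : Decidable (Pre_do_calculations_concat operands) := by
  unfold Pre_do_calculations_concat; infer_instance

def pvWitness_do_calculations_concat : List Int := [3, 5, -2]

def Spec_do_calculations_concat (operands : List Int) (out : List Int) : Prop := out = do_calculations_concat_alt operands
instance (operands : List Int) (out : List Int) : Decidable (Spec_do_calculations_concat operands out) := by unfold Spec_do_calculations_concat; infer_instance

-- ===== CLAIM (what is proved, stated in full; the proofs are below) =====
def Claim_equal_do_calculations_concat : Prop := ∀ (operands : List Int), Dom_do_calculations_concat operands → Pre_do_calculations_concat operands → Spec_do_calculations_concat operands (do_calculations_concat operands)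

-- ===== LEMMAS AND PROOFS =====

-- the common per-operand step, as B's comprehension writes it
def pvStep (h : Int) (r : List Int) : List Int :=
  r.flatMap (fun c_ => [h + c_, h * c_, pyConcatInt c_ h])

theorem pvA_cons (h : Int) (t : List Int) (ht : t ≠ []) :
    do_calculations_concat (h :: t) = pvStep h (do_calculations_concat t) := by
  rw [do_calculations_concat]
  have : (h :: t).length ≠ 1 := by
    cases t with
    | nil => exact absurd rfl ht
    | cons a s => simp
  rw [if_neg this]
  simpa [pvStep] using
    PySem.List.foldl_append_eq_flatMap
      (fun c_ => [h + c_, h * c_, pyConcatInt c_ h])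
      (do_calculations_concat t) []

-- A equals the right-to-left fold over dropLast starting from the last element
theorem pvA_foldr (operands : List Int) (hne : operands ≠ []) :
    do_calculations_concat operands =
      operands.dropLast.foldr pvStep [operands.getLast hne] := by
  induction operands with
  | nil => exact absurd rfl hne
  | cons h t ih =>
    rcases t with _ | ⟨a, s⟩
    · simp [do_calculations_concat]
    · have htne : (a :: s : List Int) ≠ [] := by simp
      rw [pvA_cons h _ htne, ih htne]
      simp [List.dropLast, List.getLast]

theorem pv_main (operands : List Int) (hne : operands ≠ []) :
    do_calculations_concat operands = do_calculations_concat_alt operands := by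
  rw [do_calculations_concat_alt]
  by_cases h1 : operands.length = 1
  · rw [if_pos h1]
    rw [do_calculations_concat.eq_def, if_pos h1]
  · rw [if_neg h1]
    rw [pvA_foldr operands hne]
    rw [PySem.List.slice_to_neg_one, PySem.List.pyGet?_neg_one,
        List.getLast?_eq_some_getLast, Option.getD_some,
        ← List.foldl_reverse]
    · simp [pvStep]
    · exact hne

-- ===== VERDICT (by name: the statement is the Claim_ definition above) =====
theorem do_calculations_concat_spec : Claim_equal_do_calculations_concat := by
  intro operands _ hpre
  exact pv_main operands hpre.1
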